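-- pv_equiv track=rewrite | github.com/HackRx-6/RIVALS | gen_code/code_0640527663604804b81845f06d95a3bb.py | kth_palindromic_permutation
-- ===== SOURCE A (Python) =====
-- from math import factorial
-- from collections import Counter
--
-- def kth_palindromic_permutation(s, k):
--     def count_palindromes(half_count):
--         total = sum(half_count.values())
--         res = factorial(total)
--         for v in half_count.values():
--             res //= factorial(v)
--         return res
--
--     freq = Counter(s)
--     odd = [c for c in freq if freq[c] % 2]
--     if len(odd) > 1:
--         return ''
--     half = []
--     half_count = {}
--     for c in sorted(freq):
--         half_count[c] = freq[c] // 2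
--         half.extend([c] * (freq[c] // 2))
--     n = len(half)
--     used = Counter()
--     res = []
--     k -= 1
--     while len(res) < n:
--         for c in sorted(half_count):
--             if used[c] < half_count[c]:
--                 used[c] += 1
--                 cnt = count_palindromes(Counter({x: half_count[x] - used[x] for x in half_count}))
--                 if k < cnt:
--                     res.append(c)
--                     break
--                 else:
--                     k -= cnt
--                 used[c] -= 1
--     first_half = ''.join(res)
--     mid = ''
--     if odd:
--         mid = odd[0]
--     return first_half + mid + first_half[::-1]
-- ===== SOURCE B (Python) =====
-- from math import factorial
-- from collections import Counter
--
-- def kth_palindromic_permutation(s, k):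
--     freq = Counter(s)
--     odd = [c for c in freq if freq[c] % 2]
--     if len(odd) > 1:
--         return ''
--     counts = [[c, freq[c] // 2] for c in sorted(freq)]
--     n = sum(m for _, m in counts)
--     # number of distinct half-permutations, computed ONCE
--     total = factorial(n)
--     for _, m in counts:
--         total //= factorial(m)
--     # A wraps an over-large rank modulo total and clamps k <= 0 to the first palindrome
--     K = (k - 1) % total if k >= 1 else 0
--     # unrank: update the permutation count P incrementally (one mul + one div per candidate)
--     res = []
--     P = total
--     tot = n
--     while tot > 0:
--         for e in counts:
--             if e[1] == 0:
--                 continue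
--             cnt = P * e[1] // tot
--             if K < cnt:
--                 res.append(e[0])
--                 P = cnt
--                 e[1] -= 1
--                 tot -= 1
--                 break
--             K -= cnt
--     half = ''.join(res)
--     mid = odd[0] if odd else ''
--     return half + mid + half[::-1]
-- ===== Notes on version B (the rewrite author's own statement) =====
-- stated objective: alternative
-- what changed: B computes the number of half-permutations once from factorials, reduces the rank modulo it ((k-1) % total, clamping k <= 0 to the first palindrome) instead of A's repeated whole-pass subtraction, and unranks by updating the running permutation count incrementally (cnt = P*m//tot, one multiply and one divide per candidate) instead of recomputing the full multinomial from factorials at every step.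
import Mathlib
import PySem

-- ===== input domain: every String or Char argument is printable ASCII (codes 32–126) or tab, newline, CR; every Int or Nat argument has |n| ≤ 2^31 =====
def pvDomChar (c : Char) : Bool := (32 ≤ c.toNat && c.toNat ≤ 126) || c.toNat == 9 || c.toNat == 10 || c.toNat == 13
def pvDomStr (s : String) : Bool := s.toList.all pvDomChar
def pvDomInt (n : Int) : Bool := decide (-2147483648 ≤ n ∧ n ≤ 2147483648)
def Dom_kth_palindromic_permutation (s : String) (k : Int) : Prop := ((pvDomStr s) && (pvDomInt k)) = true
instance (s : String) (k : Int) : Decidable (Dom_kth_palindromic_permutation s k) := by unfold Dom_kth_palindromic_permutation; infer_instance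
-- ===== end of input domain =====

-- B replaces A's per-step multinomial recomputation by a single factorial-based total,
-- a modular reduction of the rank, and incremental count updates (an alternative exact unranking).

-- ===== PORT A =====
-- math.factorial: A and B only call it on nonnegative ints, where this is exact
def pvFact (n : Int) : Int := (Nat.factorial n.toNat : Int)

-- A's inner helper count_palindromes (argument: the Counter built from the dict comprehension)
def pvCountPal (hc : PySem.Dict Char Int) : Int :=
  hc.values.foldl (fun r v => PySem.Int.floordiv r (pvFact v)) (pvFact hc.values.sum)

-- one full run of A's `for c in sorted(half_count):` scan, up to break;
-- returns (chosen char if any, threaded `used` dict, remaining k)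
def pvPassA (hc : PySem.Dict Char Int) : List Char → PySem.Dict Char Int → Int →
    Option Char × PySem.Dict Char Int × Int
  | [], used, k => (none, used, k)
  | c :: rest, used, k =>
    if used.getD c 0 < hc.getD c 0 then
      let used' := used.insert c (used.getD c 0 + 1)
      let rem := hc.keys.foldl (fun d x => d.insert x (hc.getD x 0 - used'.getD x 0))
        PySem.Dict.empty
      let cnt := pvCountPal rem
      if k < cnt then (some c, used', k)
      else pvPassA hc rest (used'.insert c (used'.getD c 0 - 1)) (k - cnt)
    else pvPassA hc rest used k

-- A's `while len(res) < n:` loop; the fuel passed below always suffices (proved later),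
-- its only role is to make the recursion structural
def pvWhileA (hc : PySem.Dict Char Int) (n : Nat) :
    Nat → PySem.Dict Char Int → List Char → Int → List Char
  | 0, _, res, _ => res
  | fuel+1, used, res, k =>
    if res.length < n then
      match pvPassA hc (PySem.List.sorted hc.keys (fun c => c) false) used k with
      | (some c, used', k') => pvWhileA hc n fuel used' (res ++ [c]) k'
      | (none, used', k') => pvWhileA hc n fuel used' res k'
    else res

def kth_palindromic_permutation (s : String) (k : Int) : String :=
  let freq := PySem.Dict.counter s.toList
  let odd := freq.keys.filter (fun c => PySem.Int.mod (freq.getD c 0) 2 != 0)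
  if odd.length > 1 then "" else
  let hs := (PySem.List.sorted freq.keys (fun c => c) false).foldl
      (fun (p : List Char × PySem.Dict Char Int) c =>
        (p.1 ++ List.replicate (PySem.Int.floordiv (freq.getD c 0) 2).toNat c,
         p.2.insert c (PySem.Int.floordiv (freq.getD c 0) 2)))
      ([], PySem.Dict.empty)
  let half_count := hs.2
  let n := hs.1.length
  let res := pvWhileA half_count n (n + (k - 1).toNat + 1) (PySem.Dict.counter []) [] (k - 1)
  let mid : List Char := match odd with | [] => [] | c :: _ => [c]
  String.ofList (res ++ mid ++ res.reverse)


-- ===== PORT B =====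
-- one full run of B's `for e in counts:` scan, up to break;
-- returns (chosen char, remaining K, new P, updated counts); none never happens while 0 ≤ K < P
def pvPassB (tot : Int) : List (Char × Int) → Int → Int →
    Option (Char × Int × Int × List (Char × Int))
  | [], _, _ => none
  | (c, m) :: rest, K, P =>
    if m == 0 then
      (pvPassB tot rest K P).map (fun r => (r.1, r.2.1, r.2.2.1, (c, m) :: r.2.2.2))
    else
      let cnt := PySem.Int.floordiv (P * m) tot
      if K < cnt then some (c, K, cnt, (c, m - 1) :: rest)
      else (pvPassB tot rest (K - cnt) P).map (fun r => (r.1, r.2.1, r.2.2.1, (c, m) :: r.2.2.2))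

-- B's `while tot > 0:` loop: tot falls by 1 each iteration, so fuel n.toNat is exact
def pvLoopB : Nat → List (Char × Int) → Int → Int → Int → List Char → List Char
  | 0, _, _, _, _, res => res
  | fuel+1, counts, K, P, tot, res =>
    if 0 < tot then
      match pvPassB tot counts K P with
      | some (c, K', P', counts') => pvLoopB fuel counts' K' P' (tot - 1) (res ++ [c])
      | none => res
    else res

def kth_palindromic_permutation_alt (s : String) (k : Int) : String :=
  let freq := PySem.Dict.counter s.toList
  let odd := freq.keys.filter (fun c => PySem.Int.mod (freq.getD c 0) 2 != 0)
  if odd.length > 1 then "" else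
  let counts := (PySem.List.sorted freq.keys (fun c => c) false).map
      (fun c => (c, PySem.Int.floordiv (freq.getD c 0) 2))
  let n := (counts.map (fun p => p.2)).sum
  let total := counts.foldl (fun t p => PySem.Int.floordiv t (pvFact p.2)) (pvFact n)
  let K := if k ≥ 1 then PySem.Int.mod (k - 1) total else 0
  let res := pvLoopB n.toNat counts K total n []
  let mid : List Char := match odd with | [] => [] | c :: _ => [c]
  String.ofList (res ++ mid ++ res.reverse)


-- ===== PRECONDITION & SPEC =====
def Spec_kth_palindromic_permutation (s : String) (k : Int) (out : String) : Prop := out = kth_palindromic_permutation_alt s k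
instance (s : String) (k : Int) (out : String) : Decidable (Spec_kth_palindromic_permutation s k out) := by unfold Spec_kth_palindromic_permutation; infer_instance

-- ===== CLAIM (what is proved, stated in full; the proofs are below) =====
def Claim_equal_kth_palindromic_permutation : Prop := ∀ (s : String) (k : Int), Dom_kth_palindromic_permutation s k → Spec_kth_palindromic_permutation s k (kth_palindromic_permutation s k)

-- ===== LEMMAS AND PROOFS =====

-- multiset-permutation counts: pvProdF ws = product of factorials, pvM ws = multinomial
def pvProdF (ws : List Nat) : Nat := (ws.map Nat.factorial).prod

def pvM (ws : List Nat) : Nat := (ws.sum).factorial / pvProdF ws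

lemma pvProdF_cons (v : Nat) (t : List Nat) :
    pvProdF (v :: t) = v.factorial * pvProdF t := by
  simp [pvProdF]

lemma pvProdF_pos (ws : List Nat) : 0 < pvProdF ws := by
  induction ws with
  | nil => simp [pvProdF]
  | cons v t ih => rw [pvProdF_cons]; exact Nat.mul_pos (Nat.factorial_pos v) ih

lemma pvProdF_dvd (ws : List Nat) : pvProdF ws ∣ (ws.sum).factorial := by
  induction ws with
  | nil => simp [pvProdF]
  | cons v t ih =>
    have h1 : v.factorial * (t.sum).factorial ∣ (v + t.sum).factorial :=
      Nat.factorial_mul_factorial_dvd_factorial_add v t.sum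
    have h2 : pvProdF (v :: t) ∣ v.factorial * (t.sum).factorial := by
      rw [pvProdF_cons]
      exact Nat.mul_dvd_mul_left _ ih
    simpa [List.sum_cons] using h2.trans h1

lemma pvM_mul (ws : List Nat) : pvM ws * pvProdF ws = (ws.sum).factorial :=
  Nat.div_mul_cancel (pvProdF_dvd ws)

lemma pvM_pos (ws : List Nat) : 0 < pvM ws := by
  rcases Nat.eq_zero_or_pos (pvM ws) with h | h
  · exfalso
    have hm := pvM_mul ws
    rw [h, Nat.zero_mul] at hm
    exact absurd hm.symm (Nat.factorial_pos _).ne'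
  · exact h

lemma pvProdF_append (w₁ w₂ : List Nat) :
    pvProdF (w₁ ++ w₂) = pvProdF w₁ * pvProdF w₂ := by
  simp [pvProdF]

-- decrement one positive entry: pvM ws * v = ws.sum * pvM (ws with v-1)
lemma pvM_dec (w₁ w₂ : List Nat) (v : Nat) (hv : 1 ≤ v) :
    pvM (w₁ ++ v :: w₂) * v = (w₁ ++ v :: w₂).sum * pvM (w₁ ++ (v - 1) :: w₂) := by
  have hS : (w₁ ++ v :: w₂).sum = (w₁ ++ (v - 1) :: w₂).sum + 1 := by
    simp only [List.sum_append, List.sum_cons]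
    omega
  have hvf : v.factorial = v * (v - 1).factorial := by
    conv_lhs => rw [show v = (v - 1) + 1 by omega]
    rw [Nat.factorial_succ]
    congr 1
    omega
  have hF : pvProdF (w₁ ++ v :: w₂) = v * pvProdF (w₁ ++ (v - 1) :: w₂) := by
    rw [pvProdF_append, pvProdF_append, pvProdF_cons, pvProdF_cons, hvf]
    ring
  have key : (pvM (w₁ ++ v :: w₂) * v) * pvProdF (w₁ ++ (v - 1) :: w₂)
      = ((w₁ ++ v :: w₂).sum * pvM (w₁ ++ (v - 1) :: w₂)) * pvProdF (w₁ ++ (v - 1) :: w₂) :=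
    calc (pvM (w₁ ++ v :: w₂) * v) * pvProdF (w₁ ++ (v - 1) :: w₂)
        = pvM (w₁ ++ v :: w₂) * (v * pvProdF (w₁ ++ (v - 1) :: w₂)) := by ring
      _ = pvM (w₁ ++ v :: w₂) * pvProdF (w₁ ++ v :: w₂) := by rw [hF]
      _ = ((w₁ ++ v :: w₂).sum).factorial := pvM_mul _
      _ = (w₁ ++ v :: w₂).sum * (((w₁ ++ (v - 1) :: w₂).sum).factorial) := by
            rw [hS, Nat.factorial_succ, ← hS]
      _ = (w₁ ++ v :: w₂).sum * (pvM (w₁ ++ (v - 1) :: w₂) * pvProdF (w₁ ++ (v - 1) :: w₂)) := by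
            rw [pvM_mul]
      _ = ((w₁ ++ v :: w₂).sum * pvM (w₁ ++ (v - 1) :: w₂)) * pvProdF (w₁ ++ (v - 1) :: w₂) := by
            ring
  exact Nat.eq_of_mul_eq_mul_right (pvProdF_pos _) key

-- the total count a scan (A's inner for-loop) distributes over the candidates
def pvCsum (w₁ : List Nat) : List Nat → Nat
  | [] => 0
  | v :: w₂ => (if 1 ≤ v then pvM (w₁ ++ (v - 1) :: w₂) else 0) + pvCsum (w₁ ++ [v]) w₂

lemma pvCsum_mul : ∀ (w₂ w₁ : List Nat),
    pvCsum w₁ w₂ * (w₁ ++ w₂).sum = pvM (w₁ ++ w₂) * w₂.sum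
  | [], w₁ => by simp [pvCsum]
  | v :: w₂, w₁ => by
    have ih := pvCsum_mul w₂ (w₁ ++ [v])
    have hassoc : w₁ ++ [v] ++ w₂ = w₁ ++ v :: w₂ := by simp
    rw [hassoc] at ih
    by_cases hv : 1 ≤ v
    · have hdec := pvM_dec w₁ w₂ v hv
      have h1 : pvM (w₁ ++ (v - 1) :: w₂) * (w₁ ++ v :: w₂).sum
          = pvM (w₁ ++ v :: w₂) * v := by
        rw [mul_comm, hdec]
      simp only [pvCsum, if_pos hv, Nat.add_mul, ih, h1, List.sum_cons]
      ring
    · have hv0 : v = 0 := by omega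
      subst hv0
      simpa [pvCsum] using ih

lemma pvCsum_eq (ws : List Nat) (h : 0 < ws.sum) : pvCsum [] ws = pvM ws := by
  have := pvCsum_mul ws []
  simp only [List.nil_append] at this
  exact Nat.eq_of_mul_eq_mul_right h this

lemma pvFact_natCast (v : Nat) : pvFact ((v : Nat) : Int) = ((v.factorial : Nat) : Int) := by
  simp [pvFact]

-- Python's chain `res //= factorial(v)` over nonnegative values is the exact multinomial quotient
lemma foldl_floordiv_fact : ∀ (ws : List Nat) (a : Nat), pvProdF ws ∣ a →
    (ws.map (fun v => ((v : Nat) : Int))).foldl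
        (fun r v => PySem.Int.floordiv r (pvFact v)) ((a : Nat) : Int)
      = ((a / pvProdF ws : Nat) : Int)
  | [], a, _ => by simp [pvProdF]
  | v :: t, a, h => by
    rw [pvProdF_cons] at h
    have hvf : v.factorial ∣ a := (Dvd.dvd.mul_right (dvd_refl v.factorial) _).trans h
    have ht : pvProdF t ∣ a / v.factorial := by
      rw [Nat.dvd_div_iff_mul_dvd hvf]
      exact h
    have step : PySem.Int.floordiv ((a : Nat) : Int) (pvFact ((v : Nat) : Int))
        = ((a / v.factorial : Nat) : Int) := by
      rw [pvFact_natCast]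
      exact PySem.Int.floordiv_natCast a v.factorial
    simp only [List.map_cons, List.foldl_cons, step, foldl_floordiv_fact t _ ht,
      Nat.div_div_eq_div_mul, pvProdF_cons]

lemma pvCountPal_eq (d : PySem.Dict Char Int) (ws : List Nat)
    (h : d.values = ws.map (fun v => ((v : Nat) : Int))) :
    pvCountPal d = ((pvM ws : Nat) : Int) := by
  unfold pvCountPal
  rw [h]
  have hsum : ((ws.map (fun v => ((v : Nat) : Int))).sum) = ((ws.sum : Nat) : Int) :=
    (Nat.cast_list_sum ws).symm
  rw [hsum, pvFact_natCast, foldl_floordiv_fact ws _ (pvProdF_dvd ws)]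
  rfl

-- getD through an insert-loop over distinct keys
lemma getD_foldl_insert_notmem (f : Char → Int) (z : Int) :
    ∀ (cs : List Char) (d : PySem.Dict Char Int) (c : Char), c ∉ cs →
    (cs.foldl (fun d x => d.insert x (f x)) d).getD c z = d.getD c z
  | [], d, c, _ => rfl
  | x :: t, d, c, h => by
    have hxc : c ≠ x := by simp at h; tauto
    have ht : c ∉ t := by simp at h; tauto
    simp only [List.foldl_cons]
    rw [getD_foldl_insert_notmem f z t _ c ht, PySem.Dict.getD_insert_of_ne d _ z hxc]

lemma getD_foldl_insert_mem (f : Char → Int) (z : Int) :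
    ∀ (cs : List Char) (d : PySem.Dict Char Int) (c : Char), cs.Nodup → c ∈ cs →
    (cs.foldl (fun d x => d.insert x (f x)) d).getD c z = f c
  | [], _, c, _, h => by simp at h
  | x :: t, d, c, hnd, h => by
    simp only [List.foldl_cons]
    rcases List.mem_cons.mp h with rfl | hct
    · have hnt : c ∉ t := (List.nodup_cons.mp hnd).1
      rw [getD_foldl_insert_notmem f z t _ c hnt, PySem.Dict.getD_insert_self]
    · exact getD_foldl_insert_mem f z t _ c (List.nodup_cons.mp hnd).2 hct

-- the two components of A's pair-state foldl are independent foldls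
lemma foldl_prod_proj {α β γ : Type} (f : α → γ → α) (g : β → γ → β) :
    ∀ (l : List γ) (a : α) (b : β),
    (l.foldl (fun p c => (f p.1 c, g p.2 c)) (a, b)) = (l.foldl f a, l.foldl g b)
  | [], _, _ => rfl
  | x :: t, a, b => foldl_prod_proj f g t (f a x) (g b x)

-- A's dict-comprehension Counter argument evaluates to the multinomial of the remaining counts
lemma cntA_eq (hc : PySem.Dict Char Int) (cs : List Char) (hn : Char → Nat)
    (hkeys : hc.keys = cs) (hnd : cs.Nodup)
    (hget : ∀ c ∈ cs, hc.getD c 0 = ((hn c : Nat) : Int))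
    (used : PySem.Dict Char Int) (u : Char → Nat)
    (hu : ∀ x, used.getD x 0 = ((u x : Nat) : Int))
    (hb : ∀ x ∈ cs, u x ≤ hn x) :
    pvCountPal (hc.keys.foldl
        (fun d x => d.insert x (hc.getD x 0 - used.getD x 0)) PySem.Dict.empty)
      = ((pvM (cs.map (fun x => hn x - u x)) : Nat) : Int) := by
  apply pvCountPal_eq
  have hfresh : ∀ a ∈ hc.keys, (PySem.Dict.empty : PySem.Dict Char Int).contains a = false := by
    intro a _
    rfl
  have hnd' : (hc.keys.map (fun a => a)).Nodup := by
    simpa [hkeys] using hnd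
  have hitems := PySem.Dict.items_foldl_insert_fresh hc.keys (fun a => a)
    (fun x => hc.getD x 0 - used.getD x 0) PySem.Dict.empty hfresh hnd'
  have hitems2 : (cs.foldl (fun d x => d.insert x (hc.getD x 0 - used.getD x 0))
      PySem.Dict.empty).items = cs.map (fun a => (a, hc.getD a 0 - used.getD a 0)) := by
    have hemp : (PySem.Dict.empty : PySem.Dict Char Int).items = [] := rfl
    simpa [hkeys, hemp] using hitems
  rw [hkeys]
  simp only [PySem.Dict.values, hitems2, List.map_map]
  apply List.map_congr_left
  intro c hcmem
  have h1 := hget c hcmem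
  have h2 := hu c
  have h3 := hb c hcmem
  simp only [Function.comp]
  rw [h1, h2]
  omega



-- A's scan when k is at least the whole remaining count: no char chosen, k drops by pvCsum
lemma passA_none (hc : PySem.Dict Char Int) (cs : List Char) (hn : Char → Nat)
    (hkeys : hc.keys = cs) (hnd : cs.Nodup)
    (hget : ∀ c ∈ cs, hc.getD c 0 = ((hn c : Nat) : Int)) :
    ∀ (cs₂ cs₁ : List Char) (used : PySem.Dict Char Int) (u : Char → Nat) (k : Int),
    cs = cs₁ ++ cs₂ →
    (∀ x, used.getD x 0 = ((u x : Nat) : Int)) →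
    (∀ x ∈ cs, u x ≤ hn x) →
    ((pvCsum (cs₁.map fun x => hn x - u x) (cs₂.map fun x => hn x - u x) : Nat) : Int) ≤ k →
    ∃ used', pvPassA hc cs₂ used k
      = (none, used',
          k - ((pvCsum (cs₁.map fun x => hn x - u x) (cs₂.map fun x => hn x - u x) : Nat) : Int))
      ∧ ∀ x, used'.getD x 0 = ((u x : Nat) : Int) := by
  intro cs₂
  induction cs₂ with
  | nil =>
    intro cs₁ used u k _ hu _ _
    refine ⟨used, ?_, hu⟩
    simp [pvPassA, pvCsum]
  | cons c rest ih =>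
    intro cs₁ used u k hsplit hu hb hk
    have hmemc : c ∈ cs := by rw [hsplit]; simp
    have hnd' : (cs₁ ++ c :: rest).Nodup := by rw [← hsplit]; exact hnd
    have hnc1 : c ∉ cs₁ := by
      have h2 := (List.nodup_append.mp hnd').2.2
      intro hcc
      exact h2 c hcc c (by simp) rfl
    have hnrest : c ∉ rest := by
      have := (List.nodup_append.mp hnd').2.1
      exact (List.nodup_cons.mp this).1
    by_cases hav : u c < hn c
    · -- candidate available: A increments, computes cnt, k ≥ cnt, undoes, continues
      have hcond : used.getD c 0 < hc.getD c 0 := by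
        rw [hu c, hget c hmemc]
        exact_mod_cast hav
      have hu1 : ∀ x, (used.insert c (used.getD c 0 + 1)).getD x 0
          = ((if x = c then u c + 1 else u x : Nat) : Int) := by
        intro x
        rw [PySem.Dict.getD_insert]
        split
        · rw [hu c]; push_cast; ring
        · exact hu x
      have hb1 : ∀ x ∈ cs, (if x = c then u c + 1 else u x) ≤ hn x := by
        intro x hx
        split
        · subst x; omega
        · exact hb x hx
      have hcnt := cntA_eq hc cs hn hkeys hnd hget _ _ hu1 hb1
      have hmapdec : cs.map (fun x => hn x - if x = c then u c + 1 else u x)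
          = (cs₁.map fun x => hn x - u x) ++ ((hn c - u c) - 1) :: (rest.map fun x => hn x - u x) := by
        rw [hsplit]
        simp only [List.map_append, List.map_cons]
        have h1 : cs₁.map (fun x => hn x - if x = c then u c + 1 else u x)
            = cs₁.map (fun x => hn x - u x) := by
          apply List.map_congr_left
          intro x hx
          have hxc : x ≠ c := fun hxe => hnc1 (hxe ▸ hx)
          simp [hxc]
        have h2 : rest.map (fun x => hn x - if x = c then u c + 1 else u x)
            = rest.map (fun x => hn x - u x) := by
          apply List.map_congr_left
          intro x hx
          have hxc : x ≠ c := fun hxe => hnrest (hxe ▸ hx)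
          simp [hxc]
        rw [h1, h2]
        have h3 : (hn c - u c) - 1 = hn c - (u c + 1) := by omega
        rw [h3]
        simp
      have hv1 : 1 ≤ hn c - u c := by omega
      have hcsum : pvCsum (cs₁.map fun x => hn x - u x) ((c :: rest).map fun x => hn x - u x)
          = pvM ((cs₁.map fun x => hn x - u x) ++ ((hn c - u c) - 1) :: (rest.map fun x => hn x - u x))
            + pvCsum ((cs₁.map fun x => hn x - u x) ++ [hn c - u c]) (rest.map fun x => hn x - u x) := by
        simp only [List.map_cons, pvCsum, if_pos hv1]
      have hknotlt : ¬ k < pvCountPal ((hc.keys).foldl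
          (fun d x => d.insert x (hc.getD x 0 - (used.insert c (used.getD c 0 + 1)).getD x 0))
          PySem.Dict.empty) := by
        rw [hcnt, hmapdec]
        rw [hcsum] at hk
        push_cast at hk ⊢
        omega
      have hu2 : ∀ x, (((used.insert c (used.getD c 0 + 1)).insert c
          ((used.insert c (used.getD c 0 + 1)).getD c 0 - 1))).getD x 0 = ((u x : Nat) : Int) := by
        intro x
        rw [PySem.Dict.getD_insert]
        split
        · subst x
          rw [hu1 c]
          simp
        · rw [hu1 x]
          split
          · simp_all
          · rfl
      have hsplit2 : cs = (cs₁ ++ [c]) ++ rest := by rw [hsplit]; simp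
      have hmap2 : (cs₁ ++ [c]).map (fun x => hn x - u x)
          = (cs₁.map fun x => hn x - u x) ++ [hn c - u c] := by simp
      have hk2 : ((pvCsum ((cs₁ ++ [c]).map fun x => hn x - u x)
          (rest.map fun x => hn x - u x) : Nat) : Int)
          ≤ k - pvCountPal ((hc.keys).foldl
            (fun d x => d.insert x (hc.getD x 0 - (used.insert c (used.getD c 0 + 1)).getD x 0))
            PySem.Dict.empty) := by
        rw [hcnt, hmapdec, hmap2]
        rw [hcsum] at hk
        push_cast at hk ⊢
        omega
      obtain ⟨used', heq, hu'⟩ := ih (cs₁ ++ [c]) _ u _ hsplit2 hu2 hb hk2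
      refine ⟨used', ?_, hu'⟩
      simp only [pvPassA]
      rw [if_pos hcond, if_neg hknotlt, heq]
      rw [hcnt, hmapdec, hmap2, hcsum]
      push_cast
      ring_nf
    · -- candidate exhausted: skipped
      have hveq : hn c - u c = 0 := by omega
      have hcond : ¬ used.getD c 0 < hc.getD c 0 := by
        rw [hu c, hget c hmemc]
        exact_mod_cast hav
      have hsplit2 : cs = (cs₁ ++ [c]) ++ rest := by rw [hsplit]; simp
      have hcsum : pvCsum (cs₁.map fun x => hn x - u x) ((c :: rest).map fun x => hn x - u x)
          = pvCsum ((cs₁ ++ [c]).map fun x => hn x - u x) (rest.map fun x => hn x - u x) := by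
        simp only [List.map_cons, List.map_append, pvCsum, hveq]
        simp
      have hk2 : ((pvCsum ((cs₁ ++ [c]).map fun x => hn x - u x)
          (rest.map fun x => hn x - u x) : Nat) : Int) ≤ k := by
        rw [← hcsum]
        exact hk
      obtain ⟨used', heq, hu'⟩ := ih (cs₁ ++ [c]) used u k hsplit2 hu hb hk2
      refine ⟨used', ?_, hu'⟩
      simp only [pvPassA]
      rw [if_neg hcond, heq, hcsum]

-- the two scans pick the same character and the surviving ranks stay related
lemma pass_eq (hc : PySem.Dict Char Int) (cs : List Char) (hn : Char → Nat)
    (hkeys : hc.keys = cs) (hnd : cs.Nodup)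
    (hget : ∀ c ∈ cs, hc.getD c 0 = ((hn c : Nat) : Int)) :
    ∀ (cs₂ cs₁ : List Char) (used : PySem.Dict Char Int) (u : Char → Nat) (kA KB : Int),
    cs = cs₁ ++ cs₂ →
    (∀ x, used.getD x 0 = ((u x : Nat) : Int)) →
    (∀ x ∈ cs, u x ≤ hn x) →
    ((kA = KB ∧ 0 ≤ kA ∧
        kA < ((pvCsum (cs₁.map fun x => hn x - u x) (cs₂.map fun x => hn x - u x) : Nat) : Int))
      ∨ (kA < 0 ∧ KB = 0 ∧ 0 < (cs₂.map fun x => hn x - u x).sum)) →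
    ∃ c kA' KB' used',
      c ∈ cs₂ ∧ u c < hn c ∧
      pvPassA hc cs₂ used kA = (some c, used', kA') ∧
      (∀ x, used'.getD x 0 = (((if x = c then u c + 1 else u x) : Nat) : Int)) ∧
      pvPassB (((cs.map fun x => hn x - u x).sum : Nat) : Int)
          (cs₂.map fun x => (x, ((hn x - u x : Nat) : Int))) KB
          ((pvM (cs.map fun x => hn x - u x) : Nat) : Int)
        = some (c, KB',
            ((pvM (cs.map fun x => hn x - (if x = c then u c + 1 else u x)) : Nat) : Int),
            cs₂.map fun x => (x, ((hn x - (if x = c then u c + 1 else u x) : Nat) : Int))) ∧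
      ((kA' = KB' ∧ 0 ≤ kA' ∧
          kA' < ((pvM (cs.map fun x => hn x - (if x = c then u c + 1 else u x)) : Nat) : Int))
        ∨ (kA' < 0 ∧ KB' = 0)) := by
  intro cs₂
  induction cs₂ with
  | nil =>
    intro cs₁ used u kA KB _ _ _ hrel
    exfalso
    rcases hrel with ⟨_, h0, hlt⟩ | ⟨_, _, hsum⟩
    · simp [pvCsum] at hlt
      omega
    · simp at hsum
  | cons c rest ih =>
    intro cs₁ used u kA KB hsplit hu hb hrel
    have hmemc : c ∈ cs := by rw [hsplit]; simp
    have hnd' : (cs₁ ++ c :: rest).Nodup := by rw [← hsplit]; exact hnd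
    have hnc1 : c ∉ cs₁ := by
      have h2 := (List.nodup_append.mp hnd').2.2
      intro hcc
      exact h2 c hcc c (by simp) rfl
    have hnrest : c ∉ rest := by
      have := (List.nodup_append.mp hnd').2.1
      exact (List.nodup_cons.mp this).1
    have hmapfull : cs.map (fun x => hn x - u x)
        = (cs₁.map fun x => hn x - u x) ++ (hn c - u c) :: (rest.map fun x => hn x - u x) := by
      rw [hsplit]; simp
    by_cases hav : u c < hn c
    · -- candidate available
      have hv1 : 1 ≤ hn c - u c := by omega
      have hcond : used.getD c 0 < hc.getD c 0 := by
        rw [hu c, hget c hmemc]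
        exact_mod_cast hav
      have hu1 : ∀ x, (used.insert c (used.getD c 0 + 1)).getD x 0
          = (((if x = c then u c + 1 else u x) : Nat) : Int) := by
        intro x
        rw [PySem.Dict.getD_insert]
        split
        · rw [hu c]; push_cast; ring
        · exact hu x
      have hb1 : ∀ x ∈ cs, (if x = c then u c + 1 else u x) ≤ hn x := by
        intro x hx
        split
        · subst x; omega
        · exact hb x hx
      have hcnt := cntA_eq hc cs hn hkeys hnd hget _ _ hu1 hb1
      have hmapdec : cs.map (fun x => hn x - if x = c then u c + 1 else u x)
          = (cs₁.map fun x => hn x - u x)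
            ++ ((hn c - u c) - 1) :: (rest.map fun x => hn x - u x) := by
        rw [hsplit]
        simp only [List.map_append, List.map_cons]
        have h1 : cs₁.map (fun x => hn x - if x = c then u c + 1 else u x)
            = cs₁.map (fun x => hn x - u x) := by
          apply List.map_congr_left
          intro x hx
          have hxc : x ≠ c := fun hxe => hnc1 (hxe ▸ hx)
          simp [hxc]
        have h2 : rest.map (fun x => hn x - if x = c then u c + 1 else u x)
            = rest.map (fun x => hn x - u x) := by
          apply List.map_congr_left
          intro x hx
          have hxc : x ≠ c := fun hxe => hnrest (hxe ▸ hx)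
          simp [hxc]
        rw [h1, h2]
        have h3 : (hn c - u c) - 1 = hn c - (u c + 1) := by omega
        rw [h3]
        simp
      have hSpos : 0 < ((cs₁.map fun x => hn x - u x)
          ++ (hn c - u c) :: (rest.map fun x => hn x - u x)).sum := by
        simp only [List.sum_append, List.sum_cons]
        omega
      have hdec := pvM_dec (cs₁.map fun x => hn x - u x) (rest.map fun x => hn x - u x)
        (hn c - u c) hv1
      have hcntB : PySem.Int.floordiv
          (((pvM (cs.map fun x => hn x - u x) : Nat) : Int) * ((hn c - u c : Nat) : Int))
          (((cs.map fun x => hn x - u x).sum : Nat) : Int)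
          = ((pvM (cs.map fun x => hn x - if x = c then u c + 1 else u x) : Nat) : Int) := by
        rw [hmapdec, hmapfull, ← Nat.cast_mul, hdec, PySem.Int.floordiv_natCast]
        congr 1
        exact Nat.mul_div_cancel_left _ hSpos
      have hm0 : ((((hn c - u c : Nat)) : Int) == 0) = false := by
        simp
        omega
      have hheadB : ∀ c' , c ≠ c' → (c, ((hn c - u c : Nat) : Int))
          = (c, ((hn c - (if c = c' then u c' + 1 else u c) : Nat) : Int)) := by
        intro c' hcc'
        simp [hcc']
      rcases hrel with ⟨hEq, h0, hlt⟩ | ⟨hneg, hKB0, hsum⟩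
      · -- in-range mode: kA = KB, 0 ≤ kA < remaining csum
        have hcsum : pvCsum (cs₁.map fun x => hn x - u x) ((c :: rest).map fun x => hn x - u x)
            = pvM ((cs₁.map fun x => hn x - u x)
                ++ ((hn c - u c) - 1) :: (rest.map fun x => hn x - u x))
              + pvCsum ((cs₁.map fun x => hn x - u x) ++ [hn c - u c])
                (rest.map fun x => hn x - u x) := by
          simp only [List.map_cons, pvCsum, if_pos hv1]
        by_cases hklt : kA < ((pvM (cs.map fun x => hn x - if x = c then u c + 1 else u x) : Nat) : Int)
        · -- both choose c, rank unchanged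
          refine ⟨c, kA, KB, used.insert c (used.getD c 0 + 1), by simp, hav, ?_, hu1, ?_,
            Or.inl ⟨hEq, h0, hklt⟩⟩
          · simp only [pvPassA]
            rw [if_pos hcond, hcnt, if_pos hklt]
          · simp only [List.map_cons, pvPassB, hm0, Bool.false_eq_true, if_false]
            rw [hcntB, if_pos (hEq ▸ hklt)]
            have hhead : ((hn c - u c : Nat) : Int) - 1
                = ((hn c - (if c = c then u c + 1 else u c) : Nat) : Int) := by
              simp
              omega
            rw [hhead]
            have htail : rest.map (fun x => (x, ((hn x - u x : Nat) : Int)))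
                = rest.map (fun x => (x, ((hn x - (if x = c then u c + 1 else u x) : Nat) : Int))) := by
              apply List.map_congr_left
              intro x hx
              have hxc : x ≠ c := fun hxe => hnrest (hxe ▸ hx)
              simp [hxc]
            rw [htail]
            simp
        · -- both skip c after subtracting the same count
          have hu2 : ∀ x, (((used.insert c (used.getD c 0 + 1)).insert c
              ((used.insert c (used.getD c 0 + 1)).getD c 0 - 1))).getD x 0
              = ((u x : Nat) : Int) := by
            intro x
            rw [PySem.Dict.getD_insert]
            split
            · subst x
              rw [hu1 c]
              simp
            · rw [hu1 x]
              split
              · simp_all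
              · rfl
          have hsplit2 : cs = (cs₁ ++ [c]) ++ rest := by rw [hsplit]; simp
          have hmap2 : (cs₁ ++ [c]).map (fun x => hn x - u x)
              = (cs₁.map fun x => hn x - u x) ++ [hn c - u c] := by simp
          obtain ⟨c', kA', KB', used'', hc'mem, hc'av, hAeq, hu'', hBeq, hrel'⟩ :=
            ih (cs₁ ++ [c]) _ u
              (kA - ((pvM (cs.map fun x => hn x - if x = c then u c + 1 else u x) : Nat) : Int))
              (KB - ((pvM (cs.map fun x => hn x - if x = c then u c + 1 else u x) : Nat) : Int))
              hsplit2 hu2 hb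
              (Or.inl ⟨by rw [hEq], by omega, by
                rw [hmap2, hmapdec]
                rw [hcsum] at hlt
                push_cast at hlt ⊢
                omega⟩)
          have hcc' : c ≠ c' := fun hce => hnrest (hce ▸ hc'mem)
          refine ⟨c', kA', KB', used'', by simp [hc'mem], hc'av, ?_, ?_, ?_, hrel'⟩
          · simp only [pvPassA]
            rw [if_pos hcond, hcnt, if_neg hklt]
            exact hAeq
          · intro x
            rw [hu'' x]
          · simp only [List.map_cons, pvPassB, hm0, Bool.false_eq_true, if_false]
            rw [hcntB, if_neg (by rw [← hEq]; exact hklt), hBeq]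
            simp only [Option.map_some]
            simp [hcc']
      · -- negative mode: both take the first available candidate
        have hMpos : (0:Int) < ((pvM (cs.map fun x => hn x - if x = c then u c + 1 else u x) : Nat) : Int) := by
          exact_mod_cast pvM_pos _
        refine ⟨c, kA, KB, used.insert c (used.getD c 0 + 1), by simp, hav, ?_, hu1, ?_,
          Or.inr ⟨hneg, hKB0⟩⟩
        · simp only [pvPassA]
          rw [if_pos hcond, hcnt, if_pos (hneg.trans hMpos)]
        · simp only [List.map_cons, pvPassB, hm0, Bool.false_eq_true, if_false]
          rw [hcntB, if_pos (by rw [hKB0]; exact hMpos)]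
          have hhead : ((hn c - u c : Nat) : Int) - 1
              = ((hn c - (if c = c then u c + 1 else u c) : Nat) : Int) := by
            simp
            omega
          rw [hhead]
          have htail : rest.map (fun x => (x, ((hn x - u x : Nat) : Int)))
              = rest.map (fun x => (x, ((hn x - (if x = c then u c + 1 else u x) : Nat) : Int))) := by
            apply List.map_congr_left
            intro x hx
            have hxc : x ≠ c := fun hxe => hnrest (hxe ▸ hx)
            simp [hxc]
          rw [htail]
          simp
    · -- candidate exhausted: both skip with nothing subtracted
      have hv0 : hn c - u c = 0 := by omega
      have hcond : ¬ used.getD c 0 < hc.getD c 0 := by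
        rw [hu c, hget c hmemc]
        exact_mod_cast hav
      have hsplit2 : cs = (cs₁ ++ [c]) ++ rest := by rw [hsplit]; simp
      have hmap2 : (cs₁ ++ [c]).map (fun x => hn x - u x)
          = (cs₁.map fun x => hn x - u x) ++ [hn c - u c] := by simp
      have hrel2 : ((kA = KB ∧ 0 ≤ kA ∧
          kA < ((pvCsum ((cs₁ ++ [c]).map fun x => hn x - u x)
            (rest.map fun x => hn x - u x) : Nat) : Int))
          ∨ (kA < 0 ∧ KB = 0 ∧ 0 < (rest.map fun x => hn x - u x).sum)) := by
        rcases hrel with ⟨hEq, h0, hlt⟩ | ⟨hneg, hKB0, hsum⟩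
        · left
          refine ⟨hEq, h0, ?_⟩
          have hcsum : pvCsum (cs₁.map fun x => hn x - u x)
              ((c :: rest).map fun x => hn x - u x)
              = pvCsum ((cs₁.map fun x => hn x - u x) ++ [hn c - u c])
                (rest.map fun x => hn x - u x) := by
            simp only [List.map_cons, pvCsum, hv0]
            simp
          rw [hmap2]
          rw [hcsum] at hlt
          exact hlt
        · right
          refine ⟨hneg, hKB0, ?_⟩
          simp only [List.map_cons, List.sum_cons, hv0] at hsum
          omega
      obtain ⟨c', kA', KB', used'', hc'mem, hc'av, hAeq, hu'', hBeq, hrel'⟩ :=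
        ih (cs₁ ++ [c]) used u kA KB hsplit2 hu hb hrel2
      have hcc' : c ≠ c' := fun hce => hnrest (hce ▸ hc'mem)
      have hm0 : ((((hn c - u c : Nat)) : Int) == 0) = true := by
        simp [hv0]
      refine ⟨c', kA', KB', used'', by simp [hc'mem], hc'av, ?_, hu'', ?_, hrel'⟩
      · simp only [pvPassA]
        rw [if_neg hcond]
        exact hAeq
      · simp only [List.map_cons, pvPassB, hm0, if_true]
        rw [hBeq]
        simp only [Option.map_some]
        simp [hcc']

-- the two whole loops agree once the rank is in range (or negative/clamped to zero)
lemma loop_eq (hc : PySem.Dict Char Int) (cs : List Char) (hn : Char → Nat)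
    (hkeys : hc.keys = cs) (hnd : cs.Nodup)
    (hget : ∀ c ∈ cs, hc.getD c 0 = ((hn c : Nat) : Int))
    (hsorted : PySem.List.sorted hc.keys (fun c => c) false = cs) :
    ∀ (t fuelA fuelB : Nat) (used : PySem.Dict Char Int) (u : Char → Nat)
      (res : List Char) (kA KB : Int) (n : Nat),
    (∀ x, used.getD x 0 = ((u x : Nat) : Int)) →
    (∀ x ∈ cs, u x ≤ hn x) →
    (cs.map fun x => hn x - u x).sum = t →
    res.length + t = n →
    t + 1 ≤ fuelA → t ≤ fuelB →
    ((kA = KB ∧ 0 ≤ kA ∧ kA < ((pvM (cs.map fun x => hn x - u x) : Nat) : Int))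
      ∨ (kA < 0 ∧ KB = 0)) →
    pvWhileA hc n fuelA used res kA
      = pvLoopB fuelB (cs.map fun x => (x, ((hn x - u x : Nat) : Int))) KB
          ((pvM (cs.map fun x => hn x - u x) : Nat) : Int) ((t : Nat) : Int) res := by
  intro t
  induction t with
  | zero =>
    intro fuelA fuelB used u res kA KB n hu hb hsum hlen hfA hfB hrel
    obtain ⟨fA, rfl⟩ : ∃ fA, fuelA = fA + 1 := ⟨fuelA - 1, by omega⟩
    have hnlt : ¬ res.length < n := by omega
    cases fuelB with
    | zero =>
      simp only [pvWhileA, pvLoopB]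
      rw [if_neg hnlt]
    | succ fB =>
      simp only [pvWhileA, pvLoopB]
      rw [if_neg hnlt, if_neg (by simp)]
  | succ t iht =>
    intro fuelA fuelB used u res kA KB n hu hb hsum hlen hfA hfB hrel
    obtain ⟨fA, rfl⟩ : ∃ fA, fuelA = fA + 1 := ⟨fuelA - 1, by omega⟩
    obtain ⟨fB, rfl⟩ : ∃ fB, fuelB = fB + 1 := ⟨fuelB - 1, by omega⟩
    have hlt' : res.length < n := by omega
    have hsum' : 0 < (cs.map fun x => hn x - u x).sum := by omega
    obtain ⟨c, kA', KB', used', hcmem, hcav, hAeq, hu', hBeq, hrel'⟩ :=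
      pass_eq hc cs hn hkeys hnd hget cs [] used u kA KB (by simp) hu hb
        (by
          rcases hrel with ⟨hEq, h0, hltM⟩ | ⟨hneg, hKB0⟩
          · left
            refine ⟨hEq, h0, ?_⟩
            rw [show (List.map (fun x => hn x - u x) ([] : List Char)) = ([] : List Nat) from rfl,
              pvCsum_eq _ hsum']
            exact hltM
          · exact Or.inr ⟨hneg, hKB0, hsum'⟩)
    -- decompose cs at the chosen character to compute the new sum
    obtain ⟨l1, l2, hldecomp⟩ := List.append_of_mem hcmem
    have hnd2 : (l1 ++ c :: l2).Nodup := by rw [← hldecomp]; exact hnd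
    have hcl1 : c ∉ l1 := by
      have h2 := (List.nodup_append.mp hnd2).2.2
      intro hcc
      exact h2 c hcc c (by simp) rfl
    have hcl2 : c ∉ l2 := by
      have := (List.nodup_append.mp hnd2).2.1
      exact (List.nodup_cons.mp this).1
    have hmapeq : ∀ (l : List Char), c ∉ l →
        l.map (fun x => hn x - if x = c then u c + 1 else u x) = l.map (fun x => hn x - u x) := by
      intro l hcl
      apply List.map_congr_left
      intro x hx
      have hxc : x ≠ c := fun hxe => hcl (hxe ▸ hx)
      simp [hxc]
    have hsum1 : (cs.map fun x => hn x - if x = c then u c + 1 else u x).sum = t := by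
      have e1 : (cs.map fun x => hn x - if x = c then u c + 1 else u x).sum
          = (l1.map fun x => hn x - u x).sum + ((hn c - (u c + 1))
            + (l2.map fun x => hn x - u x).sum) := by
        rw [hldecomp]
        simp only [List.map_append, List.map_cons, List.sum_append, List.sum_cons,
          hmapeq l1 hcl1, hmapeq l2 hcl2]
        simp
      have e2 : (cs.map fun x => hn x - u x).sum
          = (l1.map fun x => hn x - u x).sum + ((hn c - u c)
            + (l2.map fun x => hn x - u x).sum) := by
        rw [hldecomp]
        simp only [List.map_append, List.map_cons, List.sum_append, List.sum_cons]
      rw [e1]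
      rw [e2] at hsum
      omega
    have htot : ((t + 1 : Nat) : Int) - 1 = ((t : Nat) : Int) := by push_cast; ring
    calc pvWhileA hc n (fA + 1) used res kA
        = pvWhileA hc n fA used' (res ++ [c]) kA' := by
          simp only [pvWhileA]
          rw [if_pos hlt', hsorted, hAeq]
      _ = pvLoopB fB (cs.map fun x => (x, ((hn x - (if x = c then u c + 1 else u x) : Nat) : Int)))
            KB' ((pvM (cs.map fun x => hn x - (if x = c then u c + 1 else u x)) : Nat) : Int)
            ((t : Nat) : Int) (res ++ [c]) := by
          apply iht fA fB used' _ (res ++ [c]) kA' KB' n hu'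
            (by
              intro x hx
              split
              · subst x; omega
              · exact hb x hx)
            hsum1 (by simp; omega) (by omega) (by omega) hrel'
      _ = pvLoopB (fB + 1) (cs.map fun x => (x, ((hn x - u x : Nat) : Int))) KB
            ((pvM (cs.map fun x => hn x - u x) : Nat) : Int) ((t + 1 : Nat) : Int) res := by
          simp only [pvLoopB]
          rw [hsum] at hBeq
          rw [if_pos (by push_cast; omega), hBeq, htot]

-- A's loop reduces an over-large rank modulo the total count by whole wasted passes
lemma whileA_wrap (hc : PySem.Dict Char Int) (cs : List Char) (hn : Char → Nat)
    (hkeys : hc.keys = cs) (hnd : cs.Nodup)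
    (hget : ∀ c ∈ cs, hc.getD c 0 = ((hn c : Nat) : Int))
    (hsorted : PySem.List.sorted hc.keys (fun c => c) false = cs) :
    ∀ (kN : Nat), ∀ (fuelA : Nat) (used : PySem.Dict Char Int) (u : Char → Nat)
      (res : List Char) (t n : Nat),
    (∀ x, used.getD x 0 = ((u x : Nat) : Int)) →
    (∀ x ∈ cs, u x ≤ hn x) →
    (cs.map fun x => hn x - u x).sum = t →
    res.length + t = n →
    0 < t →
    kN / pvM (cs.map fun x => hn x - u x) + t + 1 ≤ fuelA →
    pvWhileA hc n fuelA used res ((kN : Nat) : Int)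
      = pvLoopB t (cs.map fun x => (x, ((hn x - u x : Nat) : Int)))
          ((kN % pvM (cs.map fun x => hn x - u x) : Nat) : Int)
          ((pvM (cs.map fun x => hn x - u x) : Nat) : Int) ((t : Nat) : Int) res := by
  intro kN
  induction kN using Nat.strong_induction_on with
  | _ kN ih =>
    intro fuelA used u res t n hu hb hsum hlen ht hfuel
    have hMpos : 0 < pvM (cs.map fun x => hn x - u x) := pvM_pos _
    by_cases hlt : kN < pvM (cs.map fun x => hn x - u x)
    · rw [Nat.mod_eq_of_lt hlt]
      exact loop_eq hc cs hn hkeys hnd hget hsorted t fuelA t used u res _ _ n hu hb hsum hlen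
        (le_trans (Nat.le_add_left (t + 1) _) hfuel) (le_refl t)
        (Or.inl ⟨rfl, Int.natCast_nonneg kN, by exact_mod_cast hlt⟩)
    · have hfApos : 0 < fuelA := Nat.lt_of_lt_of_le (Nat.succ_pos _) hfuel
      obtain ⟨fA, rfl⟩ : ∃ fA, fuelA = fA + 1 := ⟨fuelA - 1, by omega⟩
      have hcs : pvCsum (List.map (fun x => hn x - u x) ([] : List Char))
          (cs.map fun x => hn x - u x) = pvM (cs.map fun x => hn x - u x) :=
        pvCsum_eq _ (by omega)
      obtain ⟨used', hpass, hu'⟩ := passA_none hc cs hn hkeys hnd hget cs [] used u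
        ((kN : Nat) : Int) (by simp) hu hb (by rw [hcs]; exact_mod_cast Nat.le_of_not_lt hlt)
      have hsub : (((kN : Nat) : Int)
          - ((pvCsum (List.map (fun x => hn x - u x) ([] : List Char))
              (cs.map fun x => hn x - u x) : Nat) : Int))
          = ((kN - pvM (cs.map fun x => hn x - u x) : Nat) : Int) := by
        rw [hcs]
        omega
      have hstep : pvWhileA hc n (fA + 1) used res ((kN : Nat) : Int)
          = pvWhileA hc n fA used' res ((kN - pvM (cs.map fun x => hn x - u x) : Nat) : Int) := by
        simp only [pvWhileA]
        rw [if_pos (by omega), hsorted, hpass, hsub]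
      rw [hstep]
      have hdiv : kN / pvM (cs.map fun x => hn x - u x)
          = (kN - pvM (cs.map fun x => hn x - u x)) / pvM (cs.map fun x => hn x - u x) + 1 :=
        Nat.div_eq_sub_div hMpos (Nat.le_of_not_lt hlt)
      have hmod : kN % pvM (cs.map fun x => hn x - u x)
          = (kN - pvM (cs.map fun x => hn x - u x)) % pvM (cs.map fun x => hn x - u x) :=
        Nat.mod_eq_sub_mod (Nat.le_of_not_lt hlt)
      rw [hmod]
      exact ih (kN - pvM (cs.map fun x => hn x - u x)) (by omega) fA used' u res t n hu' hb
        hsum hlen ht (by omega)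

-- ===== VERDICT (by name: the statement is the Claim_ definition above) =====
theorem kth_palindromic_permutation_spec : Claim_equal_kth_palindromic_permutation := by
  intro s k _
  unfold Spec_kth_palindromic_permutation
  simp only [kth_palindromic_permutation, kth_palindromic_permutation_alt]
  by_cases hodd : ((PySem.Dict.counter s.toList).keys.filter
      (fun c => PySem.Int.mod ((PySem.Dict.counter s.toList).getD c 0) 2 != 0)).length > 1
  · rw [if_pos hodd, if_pos hodd]
  · rw [if_neg hodd, if_neg hodd]
    have hndk : (PySem.Dict.counter s.toList).keys.Nodup := PySem.Dict.nodup_keys_counter _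
    have hndcs : (PySem.List.sorted (PySem.Dict.counter s.toList).keys (fun c => c) false).Nodup :=
      (PySem.List.sorted_perm _ _ _).nodup_iff.mpr hndk
    set cs := PySem.List.sorted (PySem.Dict.counter s.toList).keys (fun c => c) false with hcsdef
    set hnf : Char → Nat := fun c => s.toList.count c / 2 with hhnf
    have hfdiv : ∀ c : Char, PySem.Int.floordiv ((PySem.Dict.counter s.toList).getD c 0) 2
        = ((hnf c : Nat) : Int) := by
      intro c
      rw [PySem.Dict.getD_counter]
      exact_mod_cast PySem.Int.floordiv_natCast (s.toList.count c) 2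
    have hpair : (cs.foldl (fun (p : List Char × PySem.Dict Char Int) c =>
          (p.1 ++ List.replicate
            (PySem.Int.floordiv ((PySem.Dict.counter s.toList).getD c 0) 2).toNat c,
           p.2.insert c (PySem.Int.floordiv ((PySem.Dict.counter s.toList).getD c 0) 2)))
          ([], PySem.Dict.empty))
        = (cs.foldl (fun h c => h ++ List.replicate
            (PySem.Int.floordiv ((PySem.Dict.counter s.toList).getD c 0) 2).toNat c) [],
           cs.foldl (fun d c => d.insert c
            (PySem.Int.floordiv ((PySem.Dict.counter s.toList).getD c 0) 2)) PySem.Dict.empty) :=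
      foldl_prod_proj
        (fun h c => h ++ List.replicate
          (PySem.Int.floordiv ((PySem.Dict.counter s.toList).getD c 0) 2).toNat c)
        (fun d c => d.insert c (PySem.Int.floordiv ((PySem.Dict.counter s.toList).getD c 0) 2))
        cs [] PySem.Dict.empty
    simp only [hpair]
    have hfresh : ∀ a ∈ cs, (PySem.Dict.empty : PySem.Dict Char Int).contains a = false := by
      intro a _
      rfl
    have hitems : ((cs.foldl (fun d c => d.insert c
        (PySem.Int.floordiv ((PySem.Dict.counter s.toList).getD c 0) 2)) PySem.Dict.empty)).items
        = cs.map (fun c => (c, PySem.Int.floordiv ((PySem.Dict.counter s.toList).getD c 0) 2)) := by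
      have h := PySem.Dict.items_foldl_insert_fresh cs (fun a => a)
        (fun c => PySem.Int.floordiv ((PySem.Dict.counter s.toList).getD c 0) 2)
        PySem.Dict.empty hfresh (by simpa using hndcs)
      have hemp : (PySem.Dict.empty : PySem.Dict Char Int).items = [] := rfl
      simpa [hemp] using h
    have hkeys : ((cs.foldl (fun d c => d.insert c
        (PySem.Int.floordiv ((PySem.Dict.counter s.toList).getD c 0) 2)) PySem.Dict.empty)).keys
        = cs := by
      simp only [PySem.Dict.keys, hitems, List.map_map]
      simp [Function.comp_def]
    have hget : ∀ c ∈ cs, ((cs.foldl (fun d c => d.insert c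
        (PySem.Int.floordiv ((PySem.Dict.counter s.toList).getD c 0) 2)) PySem.Dict.empty)).getD c 0
        = ((hnf c : Nat) : Int) := by
      intro c hcmem
      rw [getD_foldl_insert_mem _ 0 cs _ c hndcs hcmem, hfdiv]
    have hsorted : PySem.List.sorted ((cs.foldl (fun d c => d.insert c
        (PySem.Int.floordiv ((PySem.Dict.counter s.toList).getD c 0) 2)) PySem.Dict.empty)).keys
        (fun c => c) false = cs := by
      rw [hkeys, hcsdef]
      exact PySem.List.sorted_sorted _ _
    have hhalf : cs.foldl (fun h c => h ++ List.replicate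
        (PySem.Int.floordiv ((PySem.Dict.counter s.toList).getD c 0) 2).toNat c) []
        = cs.flatMap (fun c => List.replicate (hnf c) c) := by
      rw [PySem.List.foldl_append_eq_flatMap]
      simp only [List.nil_append]
      congr 1
      funext c
      rw [hfdiv c]
      simp
    have hlenhalf : (cs.flatMap (fun c => List.replicate (hnf c) c)).length
        = (cs.map hnf).sum := by
      rw [List.length_flatMap]
      simp
    simp only [hhalf, hlenhalf]
    have hcounts : cs.map (fun c => (c, PySem.Int.floordiv ((PySem.Dict.counter s.toList).getD c 0) 2))
        = cs.map (fun c => (c, ((hnf c : Nat) : Int))) := by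
      apply List.map_congr_left
      intro c _
      rw [hfdiv c]
    simp only [hcounts]
    have hnB : ((cs.map (fun c => (c, ((hnf c : Nat) : Int)))).map (fun p => p.2)).sum
        = (((cs.map hnf).sum : Nat) : Int) := by
      simp [List.map_map, Nat.cast_list_sum, Function.comp_def]
    simp only [hnB]
    have htotal : (cs.map (fun c => (c, ((hnf c : Nat) : Int)))).foldl
        (fun t p => PySem.Int.floordiv t (pvFact p.2)) (pvFact (((cs.map hnf).sum : Nat) : Int))
        = ((pvM (cs.map hnf) : Nat) : Int) := by
      rw [pvFact_natCast]
      have h := foldl_floordiv_fact (cs.map hnf) ((cs.map hnf).sum).factorial (pvProdF_dvd _)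
      rw [List.foldl_map, List.foldl_map] at h
      rw [List.foldl_map]
      exact h
    simp only [htotal, Int.toNat_natCast]
    have hu0 : ∀ x, (PySem.Dict.counter ([] : List Char)).getD x 0
        = (((0 : Nat) : Nat) : Int) := by
      intro x
      rw [PySem.Dict.getD_counter]
      simp
    have hb0 : ∀ x ∈ cs, (0 : Nat) ≤ hnf x := fun x _ => Nat.zero_le _
    have hsum0 : (cs.map fun x => hnf x - (0 : Nat)).sum = (cs.map hnf).sum := by simp
    have hmaps : (cs.map fun x => hnf x - (0 : Nat)) = cs.map hnf := by simp
    have hres : pvWhileA (cs.foldl (fun d c => d.insert c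
          (PySem.Int.floordiv ((PySem.Dict.counter s.toList).getD c 0) 2)) PySem.Dict.empty)
          ((cs.map hnf).sum) ((cs.map hnf).sum + (k - 1).toNat + 1)
          (PySem.Dict.counter []) [] (k - 1)
        = pvLoopB ((cs.map hnf).sum) (cs.map (fun c => (c, ((hnf c : Nat) : Int))))
            (if k ≥ 1 then PySem.Int.mod (k - 1) ((pvM (cs.map hnf) : Nat) : Int) else 0)
            ((pvM (cs.map hnf) : Nat) : Int) (((cs.map hnf).sum : Nat) : Int) [] := by
      by_cases hn0 : (cs.map hnf).sum = 0
      · rw [hn0]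
        simp only [pvWhileA, pvLoopB]
        rw [if_neg (by simp)]
      · have hnpos : 0 < (cs.map hnf).sum := Nat.pos_of_ne_zero hn0
        by_cases hk1 : k ≥ 1
        · rw [if_pos hk1]
          have hk0 : k - 1 = (((k - 1).toNat : Nat) : Int) := (Int.toNat_of_nonneg (by omega)).symm
          rw [hk0, PySem.Int.mod_natCast]
          exact whileA_wrap _ cs hnf hkeys hndcs hget hsorted (k - 1).toNat
            ((cs.map hnf).sum + (k - 1).toNat + 1) (PySem.Dict.counter []) (fun _ => (0 : Nat))
            [] ((cs.map hnf).sum) ((cs.map hnf).sum) hu0 hb0 hsum0 (by simp) hnpos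
            (by
              rw [hmaps]
              have := Nat.div_le_self (k - 1).toNat (pvM (cs.map hnf))
              omega)
        · rw [if_neg hk1]
          exact loop_eq _ cs hnf hkeys hndcs hget hsorted ((cs.map hnf).sum)
            ((cs.map hnf).sum + (k - 1).toNat + 1) ((cs.map hnf).sum)
            (PySem.Dict.counter []) (fun _ => (0 : Nat)) [] (k - 1) 0 ((cs.map hnf).sum)
            hu0 hb0 hsum0 (by simp) (by omega) (le_refl _) (Or.inr ⟨by omega, rfl⟩)
    rw [hres]
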